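-- pv_equiv track=rewrite | github.com/klix18/quotify.ai | backend/dwelling_parser_api.py | _normalize_field_value
-- ===== SOURCE A (Python) =====
-- def _normalize_field_value(key: str, value: str) -> str:
--     """Post-process individual field values to normalize common variations."""
--     if not isinstance(value, str) or not value.strip():
--         return value
--
--     v = value.strip()
--
--     # ── Policy form normalization ──
--     if key == "policy_form":
--         upper = v.upper().replace("-", "").replace(" ", "")
--         if upper in ("DP1",):
--             return "DP1"
--         if upper in ("DP2",):
--             return "DP2"
--         if upper in ("DP3", "DWELLINGSPECIAL", "DWELLINGPROPERTY(DP3)"):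
--             return "DP3"
--         # Check for DP form embedded in longer text
--         for form in ("DP3", "DP2", "DP1"):
--             if form in v.upper().replace("-", "").replace(" ", ""):
--                 return form
--         return v
--
--     # ── Occupancy normalization ──
--     if key == "occupancy":
--         lower = v.lower()
--         if any(t in lower for t in ("rental", "tenant", "landlord", "renter")):
--             return "Tenant Occupied"
--         if any(t in lower for t in ("owner", "primary")):
--             return "Owner Occupied"
--         if "secondary" in lower or "seasonal" in lower:
--             return "Secondary Home"
--         if "vacant" in lower:
--             return "Vacant"
--         return v
--
--     # ── Loss settlement normalization ──
--     if key in ("dwelling_loss_settlement", "personal_property_loss_settlement"):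
--         lower = v.lower()
--         if "replacement" in lower or lower == "rcv":
--             return "RCV"
--         if "actual cash" in lower or lower == "acv":
--             return "ACV"
--         return v
--
--     # ── Construction type normalization ──
--     if key == "construction_type":
--         lower = v.lower()
--         if "frame" in lower or "wood" in lower or "vinyl" in lower:
--             return "Frame"
--         if "veneer" in lower:
--             return "Masonry Veneer"
--         if "masonry" in lower or "brick" in lower:
--             return "Masonry"
--         if "fire res" in lower:
--             return "Fire Resistive"
--         if "superior" in lower:
--             return "Superior"
--         return v
--
--     # ── Wind/hail included normalization ──
--     if key == "wind_hail_included":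
--         lower = v.lower()
--         if lower in ("yes", "true", "y", "included"):
--             return "Yes"
--         if lower in ("no", "false", "n", "excluded"):
--             return "No"
--         return v
--
--     return v
-- ===== SOURCE B (Python) =====
-- # Data-driven re-implementation: one canonicalizer + one generic rule table
-- # replaces A's per-key if-cascades.
--
-- _LS_RULES = [
--     ("contains", ("replacement",), "RCV"),
--     ("equals", ("rcv",), "RCV"),
--     ("contains", ("actual cash",), "ACV"),
--     ("equals", ("acv",), "ACV"),
-- ]
--
-- _RULES = {
--     "policy_form": [
--         ("equals", ("DWELLINGSPECIAL",), "DP3"),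
--         ("contains", ("DP3",), "DP3"),
--         ("contains", ("DP2",), "DP2"),
--         ("contains", ("DP1",), "DP1"),
--     ],
--     "occupancy": [
--         ("contains", ("rental", "tenant", "landlord", "renter"), "Tenant Occupied"),
--         ("contains", ("owner", "primary"), "Owner Occupied"),
--         ("contains", ("secondary", "seasonal"), "Secondary Home"),
--         ("contains", ("vacant",), "Vacant"),
--     ],
--     "dwelling_loss_settlement": _LS_RULES,
--     "personal_property_loss_settlement": _LS_RULES,
--     "construction_type": [
--         ("contains", ("frame", "wood", "vinyl"), "Frame"),
--         ("contains", ("veneer",), "Masonry Veneer"),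
--         ("contains", ("masonry", "brick"), "Masonry"),
--         ("contains", ("fire res",), "Fire Resistive"),
--         ("contains", ("superior",), "Superior"),
--     ],
--     "wind_hail_included": [
--         ("equals", ("yes", "true", "y", "included"), "Yes"),
--         ("equals", ("no", "false", "n", "excluded"), "No"),
--     ],
-- }
--
--
-- def _canon(key, v):
--     if key == "policy_form":
--         return v.upper().replace("-", "").replace(" ", "")
--     return v.lower()
--
--
-- def _normalize_field_value(key: str, value: str) -> str:
--     if not isinstance(value, str) or not value.strip():
--         return value
--     v = value.strip()
--     t = _canon(key, v)
--     for kind, pats, out in _RULES.get(key, ()):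
--         if any((p in t) if kind == "contains" else (t == p) for p in pats):
--             return out
--     return v
-- ===== Notes on version B (the rewrite author's own statement) =====
-- stated objective: simpler
-- what changed: Replaced A's per-key if-elif cascades with a single key-indexed table of (match_kind, patterns, canonical) rules plus one canonicalizer and one generic first-match loop.
import Mathlib
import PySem

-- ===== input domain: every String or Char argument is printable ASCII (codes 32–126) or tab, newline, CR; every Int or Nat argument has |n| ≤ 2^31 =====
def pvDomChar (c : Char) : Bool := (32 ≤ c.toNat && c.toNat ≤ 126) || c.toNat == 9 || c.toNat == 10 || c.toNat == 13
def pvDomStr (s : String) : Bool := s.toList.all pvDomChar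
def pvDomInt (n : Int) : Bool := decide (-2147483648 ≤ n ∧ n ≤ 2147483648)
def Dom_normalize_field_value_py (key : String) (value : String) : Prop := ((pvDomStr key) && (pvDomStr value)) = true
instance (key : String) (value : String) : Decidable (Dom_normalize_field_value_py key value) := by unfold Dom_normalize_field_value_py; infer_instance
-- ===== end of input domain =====

-- B replaces A's per-key if-cascades with one canonicalizer and a generic loop
-- over a key-indexed rule table (objective: simpler / data-driven).

-- ===== PORT A =====
-- the 'for form in ("DP3","DP2","DP1")' loop of A (recomputes the normalized upper string each iteration, as A does)
def pvAFormLoop (v : String) : List String → String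
  | [] => v
  | f :: rest =>
      if PySem.Str.isIn f (PySem.Str.replace (PySem.Str.replace (PySem.Str.upper v) "-" "") " " "") then f
      else pvAFormLoop v rest

def normalize_field_value_py (key : String) (value : String) : String :=
  if PySem.Str.strip value = "" then value
  else
    let v := PySem.Str.strip value
    if key = "policy_form" then
      let upper := PySem.Str.replace (PySem.Str.replace (PySem.Str.upper v) "-" "") " " ""
      if upper = "DP1" then "DP1"
      else if upper = "DP2" then "DP2"
      else if upper = "DP3" ∨ upper = "DWELLINGSPECIAL" ∨ upper = "DWELLINGPROPERTY(DP3)" then "DP3"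
      else pvAFormLoop v ["DP3", "DP2", "DP1"]
    else if key = "occupancy" then
      let lower := PySem.Str.lower v
      if List.any ["rental", "tenant", "landlord", "renter"] (fun t => PySem.Str.isIn t lower) then "Tenant Occupied"
      else if List.any ["owner", "primary"] (fun t => PySem.Str.isIn t lower) then "Owner Occupied"
      else if PySem.Str.isIn "secondary" lower || PySem.Str.isIn "seasonal" lower then "Secondary Home"
      else if PySem.Str.isIn "vacant" lower then "Vacant"
      else v
    else if key = "dwelling_loss_settlement" ∨ key = "personal_property_loss_settlement" then
      let lower := PySem.Str.lower v
      if PySem.Str.isIn "replacement" lower || (lower = "rcv") then "RCV"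
      else if PySem.Str.isIn "actual cash" lower || (lower = "acv") then "ACV"
      else v
    else if key = "construction_type" then
      let lower := PySem.Str.lower v
      if PySem.Str.isIn "frame" lower || PySem.Str.isIn "wood" lower || PySem.Str.isIn "vinyl" lower then "Frame"
      else if PySem.Str.isIn "veneer" lower then "Masonry Veneer"
      else if PySem.Str.isIn "masonry" lower || PySem.Str.isIn "brick" lower then "Masonry"
      else if PySem.Str.isIn "fire res" lower then "Fire Resistive"
      else if PySem.Str.isIn "superior" lower then "Superior"
      else v
    else if key = "wind_hail_included" then
      let lower := PySem.Str.lower v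
      if lower = "yes" ∨ lower = "true" ∨ lower = "y" ∨ lower = "included" then "Yes"
      else if lower = "no" ∨ lower = "false" ∨ lower = "n" ∨ lower = "excluded" then "No"
      else v
    else v

-- ===== PORT B =====
inductive PVKind where
  | contains
  | equals
deriving DecidableEq, Repr

def pvLsRules : List (PVKind × List String × String) :=
  [(.contains, ["replacement"], "RCV"),
   (.equals, ["rcv"], "RCV"),
   (.contains, ["actual cash"], "ACV"),
   (.equals, ["acv"], "ACV")]

def pvRules : PySem.Dict String (List (PVKind × List String × String)) :=
  PySem.Dict.ofList
    [("policy_form",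
      [(.equals, ["DWELLINGSPECIAL"], "DP3"),
       (.contains, ["DP3"], "DP3"),
       (.contains, ["DP2"], "DP2"),
       (.contains, ["DP1"], "DP1")]),
     ("occupancy",
      [(.contains, ["rental", "tenant", "landlord", "renter"], "Tenant Occupied"),
       (.contains, ["owner", "primary"], "Owner Occupied"),
       (.contains, ["secondary", "seasonal"], "Secondary Home"),
       (.contains, ["vacant"], "Vacant")]),
     ("dwelling_loss_settlement", pvLsRules),
     ("personal_property_loss_settlement", pvLsRules),
     ("construction_type",
      [(.contains, ["frame", "wood", "vinyl"], "Frame"),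
       (.contains, ["veneer"], "Masonry Veneer"),
       (.contains, ["masonry", "brick"], "Masonry"),
       (.contains, ["fire res"], "Fire Resistive"),
       (.contains, ["superior"], "Superior")]),
     ("wind_hail_included",
      [(.equals, ["yes", "true", "y", "included"], "Yes"),
       (.equals, ["no", "false", "n", "excluded"], "No")])]

def pvCanon (key : String) (v : String) : String :=
  if key = "policy_form" then PySem.Str.replace (PySem.Str.replace (PySem.Str.upper v) "-" "") " " ""
  else PySem.Str.lower v

def pvRuleMatch (kind : PVKind) (t : String) (pats : List String) : Bool :=
  pats.any (fun p => match kind with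
    | .contains => PySem.Str.isIn p t
    | .equals => t == p)

def pvRunRules (t : String) (v : String) : List (PVKind × List String × String) → String
  | [] => v
  | (kind, pats, out) :: rest =>
      if pvRuleMatch kind t pats then out else pvRunRules t v rest

def normalize_field_value_py_alt (key : String) (value : String) : String :=
  if PySem.Str.strip value = "" then value
  else
    let v := PySem.Str.strip value
    pvRunRules (pvCanon key v) v (PySem.Dict.getD pvRules key [])

-- ===== PRECONDITION & SPEC =====
def Spec_normalize_field_value_py (key : String) (value : String) (out : String) : Prop := out = normalize_field_value_py_alt key value
instance (key : String) (value : String) (out : String) : Decidable (Spec_normalize_field_value_py key value out) := by unfold Spec_normalize_field_value_py; infer_instance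

-- ===== CLAIM (what is proved, stated in full; the proofs are below) =====
def Claim_equal_normalize_field_value_py : Prop := ∀ (key : String) (value : String), Dom_normalize_field_value_py key value → Spec_normalize_field_value_py key value (normalize_field_value_py key value)

-- ===== LEMMAS AND PROOFS =====

-- the policy_form branch of A equals B's rule loop for that key
lemma pv_policy (v : String) :
    (let upper := PySem.Str.replace (PySem.Str.replace (PySem.Str.upper v) "-" "") " " ""
     if upper = "DP1" then "DP1"
     else if upper = "DP2" then "DP2"
     else if upper = "DP3" ∨ upper = "DWELLINGSPECIAL" ∨ upper = "DWELLINGPROPERTY(DP3)" then "DP3"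
     else pvAFormLoop v ["DP3", "DP2", "DP1"]) =
    pvRunRules (PySem.Str.replace (PySem.Str.replace (PySem.Str.upper v) "-" "") " " "") v
      (PySem.Dict.getD pvRules "policy_form" []) := by
  have e : PySem.Dict.getD pvRules "policy_form" [] =
      [(.equals, ["DWELLINGSPECIAL"], "DP3"),
       (.contains, ["DP3"], "DP3"),
       (.contains, ["DP2"], "DP2"),
       (.contains, ["DP1"], "DP1")] := rfl
  rw [e]
  simp only [pvAFormLoop, pvRunRules, pvRuleMatch, List.any_cons, List.any_nil,
    Bool.or_false, beq_iff_eq]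
  generalize PySem.Str.replace (PySem.Str.replace (PySem.Str.upper v) "-" "") " " "" = u
  by_cases h1 : u = "DP1"
  · subst h1; rfl
  by_cases h2 : u = "DP2"
  · subst h2; rfl
  by_cases h3 : u = "DP3" ∨ u = "DWELLINGSPECIAL" ∨ u = "DWELLINGPROPERTY(DP3)"
  · rcases h3 with h | h | h <;> subst h <;> rfl
  · push Not at h3
    obtain ⟨h3a, h3b, h3c⟩ := h3
    simp [h1, h2, h3a, h3b, h3c]

-- the loss-settlement branch of A equals B's rule list pvLsRules
lemma pv_ls (v : String) :
    (let lower := PySem.Str.lower v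
     if PySem.Str.isIn "replacement" lower || (lower == "rcv") then "RCV"
     else if PySem.Str.isIn "actual cash" lower || (lower == "acv") then "ACV"
     else v) =
    pvRunRules (PySem.Str.lower v) v pvLsRules := by
  simp only [pvLsRules, pvRunRules, pvRuleMatch, List.any_cons, List.any_nil,
    Bool.or_false, Bool.or_eq_true, beq_iff_eq]
  split_ifs <;> simp_all

-- ===== VERDICT (by name: the statement is the Claim_ definition above) =====
set_option maxHeartbeats 1000000 in
theorem normalize_field_value_py_spec : Claim_equal_normalize_field_value_py := by
  intro key value _
  unfold Spec_normalize_field_value_py normalize_field_value_py normalize_field_value_py_alt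
  by_cases h0 : PySem.Str.strip value = ""
  · simp [h0]
  simp only [if_neg h0]
  by_cases k1 : key = "policy_form"
  · subst k1
    simp only [if_true]
    have ec : pvCanon "policy_form" (PySem.Str.strip value) =
        PySem.Str.replace (PySem.Str.replace (PySem.Str.upper (PySem.Str.strip value)) "-" "") " " "" := by
      simp [pvCanon]
    rw [ec]
    exact pv_policy (PySem.Str.strip value)
  by_cases k2 : key = "occupancy"
  · subst k2
    simp [pvRunRules, pvRuleMatch, pvCanon,
      show PySem.Dict.getD pvRules "occupancy" [] =
        [(.contains, ["rental", "tenant", "landlord", "renter"], "Tenant Occupied"),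
         (.contains, ["owner", "primary"], "Owner Occupied"),
         (.contains, ["secondary", "seasonal"], "Secondary Home"),
         (.contains, ["vacant"], "Vacant")] from rfl]
  by_cases k3 : key = "dwelling_loss_settlement"
  · subst k3
    have e : PySem.Dict.getD pvRules "dwelling_loss_settlement" [] = pvLsRules := rfl
    rw [e]
    simpa [pvCanon] using pv_ls (PySem.Str.strip value)
  by_cases k4 : key = "personal_property_loss_settlement"
  · subst k4
    have e : PySem.Dict.getD pvRules "personal_property_loss_settlement" [] = pvLsRules := rfl
    rw [e]
    simpa [pvCanon, k3] using pv_ls (PySem.Str.strip value)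
  by_cases k5 : key = "construction_type"
  · subst k5
    simp [pvRunRules, pvRuleMatch, pvCanon, Bool.or_assoc,
      show PySem.Dict.getD pvRules "construction_type" [] =
        [(.contains, ["frame", "wood", "vinyl"], "Frame"),
         (.contains, ["veneer"], "Masonry Veneer"),
         (.contains, ["masonry", "brick"], "Masonry"),
         (.contains, ["fire res"], "Fire Resistive"),
         (.contains, ["superior"], "Superior")] from rfl]
  by_cases k6 : key = "wind_hail_included"
  · subst k6
    simp [pvRunRules, pvRuleMatch, pvCanon,
      show PySem.Dict.getD pvRules "wind_hail_included" [] =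
        [(.equals, ["yes", "true", "y", "included"], "Yes"),
         (.equals, ["no", "false", "n", "excluded"], "No")] from rfl]
  · have e : PySem.Dict.getD pvRules key [] = [] := by
      simp [pvRules, PySem.Dict.getD, PySem.Dict.get?,
        show PySem.Dict.ofList
          [("policy_form", [((PVKind.equals : PVKind), ["DWELLINGSPECIAL"], "DP3"), (.contains, ["DP3"], "DP3"), (.contains, ["DP2"], "DP2"), (.contains, ["DP1"], "DP1")]),
           ("occupancy", [(.contains, ["rental", "tenant", "landlord", "renter"], "Tenant Occupied"), (.contains, ["owner", "primary"], "Owner Occupied"), (.contains, ["secondary", "seasonal"], "Secondary Home"), (.contains, ["vacant"], "Vacant")]),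
           ("dwelling_loss_settlement", pvLsRules),
           ("personal_property_loss_settlement", pvLsRules),
           ("construction_type", [(.contains, ["frame", "wood", "vinyl"], "Frame"), (.contains, ["veneer"], "Masonry Veneer"), (.contains, ["masonry", "brick"], "Masonry"), (.contains, ["fire res"], "Fire Resistive"), (.contains, ["superior"], "Superior")]),
           ("wind_hail_included", [(.equals, ["yes", "true", "y", "included"], "Yes"), (.equals, ["no", "false", "n", "excluded"], "No")])] =
          PySem.Dict.mk
          [("policy_form", [((PVKind.equals : PVKind), ["DWELLINGSPECIAL"], "DP3"), (.contains, ["DP3"], "DP3"), (.contains, ["DP2"], "DP2"), (.contains, ["DP1"], "DP1")]),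
           ("occupancy", [(.contains, ["rental", "tenant", "landlord", "renter"], "Tenant Occupied"), (.contains, ["owner", "primary"], "Owner Occupied"), (.contains, ["secondary", "seasonal"], "Secondary Home"), (.contains, ["vacant"], "Vacant")]),
           ("dwelling_loss_settlement", pvLsRules),
           ("personal_property_loss_settlement", pvLsRules),
           ("construction_type", [(.contains, ["frame", "wood", "vinyl"], "Frame"), (.contains, ["veneer"], "Masonry Veneer"), (.contains, ["masonry", "brick"], "Masonry"), (.contains, ["fire res"], "Fire Resistive"), (.contains, ["superior"], "Superior")]),
           ("wind_hail_included", [(.equals, ["yes", "true", "y", "included"], "Yes"), (.equals, ["no", "false", "n", "excluded"], "No")])] from rfl,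
        Ne.symm k1, Ne.symm k2, Ne.symm k3, Ne.symm k4, Ne.symm k5, Ne.symm k6]
    rw [e]
    simp [k1, k2, k3, k4, k5, k6, pvRunRules]
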